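-- pv_equiv track=rewrite | github.com/Rezanikmanesh-79/noob-in-python | python/project-0/project-0/done/6/PythonApplication4.py | check_trend
-- ===== SOURCE A (Python) =====
-- def check_trend(data):
--     trends = {}
--     for year, excel_files in data.items():
--         for excel_file, total_sum in excel_files.items():
--             if excel_file not in trends:
--                 trends[excel_file] = total_sum
--             else:
--                 if total_sum > trends[excel_file]:
--                     trends[excel_file] = total_sum
--
--     # Sort the results based on the values
--     sorted_trends = sorted(trends.items(), key=lambda item: item[1], reverse=True)
--     return sorted_trends
-- ===== SOURCE B (Python) =====
-- def check_trend(data):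
--     # Collect-then-reduce: group every total_sum by excel_file (first-appearance
--     # order), then reduce each group to its max, then sort by value descending.
--     groups = {}
--     for excel_files in data.values():
--         for excel_file, total_sum in excel_files.items():
--             groups.setdefault(excel_file, []).append(total_sum)
--     return sorted(((f, max(vs)) for f, vs in groups.items()),
--                   key=lambda item: item[1], reverse=True)
-- ===== Notes on version B (the rewrite author's own statement) =====
-- stated objective: alternative
-- what changed: Replaces the single-pass running-max dict with a collect-all-then-reduce pipeline: first group every value by excel_file in an insertion-ordered dict of lists, then reduce each list with max() in a second pass, then sort by value descending.
import Mathlib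
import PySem

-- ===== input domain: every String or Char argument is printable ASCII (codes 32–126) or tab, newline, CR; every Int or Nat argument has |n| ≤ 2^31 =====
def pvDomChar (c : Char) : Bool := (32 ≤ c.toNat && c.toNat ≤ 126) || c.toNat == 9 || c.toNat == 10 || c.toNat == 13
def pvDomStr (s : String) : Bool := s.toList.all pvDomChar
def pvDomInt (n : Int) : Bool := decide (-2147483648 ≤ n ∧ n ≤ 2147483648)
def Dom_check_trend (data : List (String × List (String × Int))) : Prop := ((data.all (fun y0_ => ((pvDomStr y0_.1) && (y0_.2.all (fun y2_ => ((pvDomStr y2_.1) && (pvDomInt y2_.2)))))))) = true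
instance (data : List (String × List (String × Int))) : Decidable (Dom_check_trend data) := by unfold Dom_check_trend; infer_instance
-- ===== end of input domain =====

-- B replaces A's single-pass running-max dict with a collect-all-then-reduce pipeline
-- (group values per file, then max per group, then sort); alternative decomposition, same cost.


-- ===== PORT A =====
def check_trend (data : List (String × List (String × Int))) : List (String × Int) :=
  let trends : PySem.Dict String Int :=
    data.foldl (fun trends y =>
      y.2.foldl (fun trends p =>
        if trends.contains p.1 = false then trends.insert p.1 p.2
        else if p.2 > trends.getD p.1 0 then trends.insert p.1 p.2
        else trends) trends) PySem.Dict.empty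
  PySem.List.sorted trends.items (fun item => item.2) true

-- ===== PORT B =====
-- max(vs) on a nonempty list (the [] case is unreachable: every group list is built nonempty)
def pymax (vs : List Int) : Int :=
  match vs with
  | [] => 0
  | h :: t => t.foldl max h

def check_trend_alt (data : List (String × List (String × Int))) : List (String × Int) :=
  let groups : PySem.Dict String (List Int) :=
    data.foldl (fun g y =>
      y.2.foldl (fun g p => g.modify p.1 [] (fun vs => vs ++ [p.2])) g) PySem.Dict.empty
  PySem.List.sorted (groups.items.map (fun p => (p.1, pymax p.2)))
    (fun item => item.2) true

-- ===== PRECONDITION & SPEC =====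
def Spec_check_trend (data : List (String × List (String × Int))) (out : List (String × Int)) : Prop := out = check_trend_alt data
instance (data : List (String × List (String × Int))) (out : List (String × Int)) : Decidable (Spec_check_trend data out) := by unfold Spec_check_trend; infer_instance

-- ===== CLAIM (what is proved, stated in full; the proofs are below) =====
def Claim_equal_check_trend : Prop := ∀ (data : List (String × List (String × Int))), Dom_check_trend data → Spec_check_trend data (check_trend data)

-- ===== LEMMAS AND PROOFS =====

-- a nested per-year fold is the fold over the flattened pair list
theorem foldl_nested_flatMap {δ : Type} (step : δ → String × Int → δ)
    (data : List (String × List (String × Int))) (init : δ) :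
    data.foldl (fun d y => y.2.foldl step d) init
      = (data.flatMap (fun y => y.2)).foldl step init := by
  induction data generalizing init with
  | nil => rfl
  | cons y t ih => simp [List.foldl_append, ih]

theorem pymax_append_singleton (vs : List Int) (s : Int) (h : vs ≠ []) :
    pymax (vs ++ [s]) = max (pymax vs) s := by
  match vs with
  | [] => exact absurd rfl h
  | a :: t => simp [pymax, List.foldl_append]

-- loop invariant: A's running-max dict is B's group dict reduced by pymax
theorem main_inv (ps : List (String × Int)) (dA : PySem.Dict String Int)
    (g : PySem.Dict String (List Int))
    (hnd : g.keys.Nodup)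
    (h : dA.items = g.items.map (fun p => (p.1, pymax p.2)))
    (hne : ∀ p ∈ g.items, p.2 ≠ []) :
    (ps.foldl (fun trends p =>
        if trends.contains p.1 = false then trends.insert p.1 p.2
        else if p.2 > trends.getD p.1 0 then trends.insert p.1 p.2
        else trends) dA).items
      = ((ps.foldl (fun g p => g.modify p.1 [] (fun vs => vs ++ [p.2])) g).items).map
          (fun p => (p.1, pymax p.2)) := by
  induction ps generalizing dA g with
  | nil => exact h
  | cons p t ih =>
    obtain ⟨f, s⟩ := p
    have hkeys : dA.keys = g.keys := by
      simp only [PySem.Dict.keys, h, List.map_map]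
      rfl
    have hcont : dA.contains f = g.contains f := by
      rw [PySem.Dict.contains_eq_decide_mem_keys, PySem.Dict.contains_eq_decide_mem_keys, hkeys]
    have hmod : g.modify f [] (fun vs => vs ++ [s]) = g.insert f (g.getD f [] ++ [s]) := rfl
    by_cases hc : g.contains f = true
    · -- already seen: B appends to the group, A keeps the running max
      obtain ⟨vs, hvs⟩ : ∃ vs, g.get? f = some vs := by
        have := PySem.Dict.contains_eq_isSome_get? (d := g) (k := f)
        rw [hc] at this
        exact Option.isSome_iff_exists.mp this.symm
      have hmem : (f, vs) ∈ g.items := PySem.Dict.mem_items_of_get?_eq_some g hvs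
      have hgetD : g.getD f [] = vs := PySem.Dict.getD_of_get?_eq_some g [] hvs
      have hvsne : vs ≠ [] := hne _ hmem
      have hdA : dA.getD f 0 = pymax vs := by
        have hmemA : (f, pymax vs) ∈ dA.items := by
          rw [h]; exact List.mem_map_of_mem hmem
        exact PySem.Dict.getD_of_mem_items dA hmemA (hkeys ▸ hnd) 0
      have hcA : dA.contains f = true := hcont.trans hc
      have itemsB : (g.insert f (vs ++ [s])).items
          = g.items.map (fun q => if q.1 == f then (f, vs ++ [s]) else q) :=
        PySem.Dict.items_insert_of_contains g (vs ++ [s]) hc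
      have hnd' : (g.modify f [] (fun vs => vs ++ [s])).keys.Nodup := by
        rw [hmod, hgetD, PySem.Dict.keys_insert_of_contains g (vs ++ [s]) hc]; exact hnd
      have hne' : ∀ q ∈ (g.modify f [] (fun vs => vs ++ [s])).items, q.2 ≠ [] := by
        intro q hq
        rw [hmod, hgetD] at hq
        rcases (PySem.Dict.mem_items_insert _ _ _ _).mp hq with hq | ⟨hq, _⟩
        · subst hq; simp
        · exact hne _ hq
      simp only [List.foldl_cons, hcA]
      by_cases hgt : s > dA.getD f 0
      · -- new max
        rw [if_neg (by simp), if_pos hgt]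
        apply ih _ _ hnd' _ hne'
        rw [hmod, hgetD, itemsB,
            PySem.Dict.items_insert_of_contains dA s hcA,
            h, List.map_map, List.map_map]
        apply List.map_congr_left
        intro q hq
        by_cases hqf : q.1 == f
        · simp only [Function.comp, hqf, if_pos]
          have : pymax (vs ++ [s]) = s := by
            rw [pymax_append_singleton _ _ hvsne]
            rw [hdA] at hgt; omega
          simp [this]
        · simp [Function.comp, hqf]
      · -- old max stays
        rw [if_neg (by simp), if_neg hgt]
        apply ih _ _ hnd' _ hne'
        rw [hmod, hgetD, itemsB, h, List.map_map]
        apply List.map_congr_left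
        intro q hq
        by_cases hqf : q.1 == f
        · have hqvs : q.2 = vs := by
            have h1 : g.get? q.1 = some q.2 := PySem.Dict.get?_of_mem_items g hq hnd
            rw [eq_of_beq hqf, hvs] at h1
            exact (Option.some.injEq _ _ ▸ h1).symm ▸ rfl
          have : pymax (vs ++ [s]) = pymax vs := by
            rw [pymax_append_singleton _ _ hvsne]
            rw [hdA] at hgt; omega
          have hq1 : q.1 = f := eq_of_beq hqf
          simp [Function.comp, hq1, hqvs, this]
        · simp [Function.comp, hqf]
    · -- fresh key: both append at the end
      have hc' : g.contains f = false := by simpa using hc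
      have hcA : dA.contains f = false := hcont.trans hc'
      have hgetD : g.getD f [] = [] := PySem.Dict.getD_of_not_contains g [] hc'
      simp only [List.foldl_cons, hcA, if_true]
      have hnd' : (g.modify f [] (fun vs => vs ++ [s])).keys.Nodup := by
        rw [hmod, hgetD, PySem.Dict.keys_insert_of_not_contains g ([] ++ [s]) hc']
        have hfmem : f ∉ g.keys := by
          rw [PySem.Dict.contains_eq_decide_mem_keys] at hc'
          simpa using hc'
        refine List.Nodup.append hnd (by simp) ?_
        intro a ha hb
        simp only [List.mem_singleton] at hb
        exact hfmem (hb ▸ ha)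
      have hne' : ∀ q ∈ (g.modify f [] (fun vs => vs ++ [s])).items, q.2 ≠ [] := by
        intro q hq
        rw [hmod, hgetD, PySem.Dict.items_insert_of_not_contains g ([] ++ [s]) hc'] at hq
        rcases List.mem_append.mp hq with hq | hq
        · exact hne _ hq
        · simp only [List.mem_singleton] at hq; subst hq; simp
      apply ih _ _ hnd' _ hne'
      rw [hmod, hgetD, PySem.Dict.items_insert_of_not_contains g ([] ++ [s]) hc',
          PySem.Dict.items_insert_of_not_contains dA s hcA, h]
      simp [pymax]

-- ===== VERDICT (by name: the statement is the Claim_ definition above) =====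
theorem check_trend_spec : Claim_equal_check_trend := by
  intro data _
  unfold Spec_check_trend check_trend check_trend_alt
  dsimp only
  rw [foldl_nested_flatMap, foldl_nested_flatMap,
      main_inv (data.flatMap (fun y => y.2)) PySem.Dict.empty PySem.Dict.empty
        (by simp [PySem.Dict.keys_empty]) rfl (by simp [PySem.Dict.empty])]
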